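-- pv_equiv track=rewrite | github.com/cybsbbb/codeforces_practice | contests/Round885/C.py | helper
-- ===== SOURCE A (Python) =====
-- def helper(a, b):
--     if a == 0 and b == 0:
--         return {0, 1, 2}
--     cur = 0
--     if a == 0:
--         return {cur}
--     if b == 0:
--         return {(cur + 1) % 3}
--     if a > b:
--         a -= (a // (b * 2)) * (b * 2)
--         if a == 0:
--             return {cur}
--     elif b > a:
--         b -= (b // (a * 2)) * (a * 2)
--         if b == 0:
--             return {(cur + 1) % 3}
--     while True:
--         a, b = b, abs(a - b)
--         cur = (cur + 1) % 3
--         if a == 0: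
--             return {cur}
--         if b == 0:
--             return {(cur + 1) % 3}
--         if a > b:
--             a -= (a // (b * 2)) * (b * 2)
--             if a == 0:
--                 return {cur}
--         elif b > a:
--             b -= (b // (a * 2)) * (a * 2)
--             if b == 0:
--                 return {(cur + 1) % 3}
-- ===== SOURCE B (Python) =====
-- def helper(a, b):
--     # Outcome of the subtraction game in closed form: strip the common factors
--     # of two, then the answer depends only on the parities of the reduced pair.
--     if a == 0 and b == 0:
--         return {0, 1, 2}
--     if a == 0:
--         return {0}
--     if b == 0:
--         return {1}
--     while a % 2 == 0 and b % 2 == 0: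
--         a //= 2
--         b //= 2
--     if a % 2 == 1:
--         return {2} if b % 2 == 1 else {1}
--     return {0}
-- ===== Notes on version B (the rewrite author's own statement) =====
-- stated objective: simpler
-- what changed: Replaces the batched Euclidean subtraction-game simulation with a closed-form rule: strip the common factors of two, then the answer is determined by the parities of the reduced pair (equivalently, by comparing the 2-adic valuations of a and b); Pre_ excludes negative inputs, on most of which A loops forever and on which any returned value is an accident of floor division toward minus infinity.
-- outside the precondition, e.g. on helper(-1, 1): A returns {2}, B returns {2}; on helper(-3, -1): A returns {2}, B returns {2}
import Mathlib
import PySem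

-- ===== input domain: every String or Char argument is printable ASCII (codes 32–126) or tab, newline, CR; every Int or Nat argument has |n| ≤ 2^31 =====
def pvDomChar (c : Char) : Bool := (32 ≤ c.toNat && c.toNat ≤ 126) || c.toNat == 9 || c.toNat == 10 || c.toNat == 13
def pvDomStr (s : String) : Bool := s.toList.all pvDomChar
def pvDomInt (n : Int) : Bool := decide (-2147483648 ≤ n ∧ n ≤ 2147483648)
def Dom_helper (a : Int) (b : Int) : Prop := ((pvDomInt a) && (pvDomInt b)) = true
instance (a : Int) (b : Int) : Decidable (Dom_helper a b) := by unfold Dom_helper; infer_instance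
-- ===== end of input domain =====

-- B replaces A's batched subtraction-game simulation by the closed-form parity rule:
-- strip the common factors of two, then the answer depends only on the parities of the reduced pair.

-- ===== PORT A =====
-- the 'while True' loop, fueled; on inputs satisfying Pre_ the fuel passed below is proved sufficient
def helperLoop : Nat → Int → Int → Int → List Int
  | 0, _, _, _ => []
  | fuel + 1, a, b, cur =>
      let a1 := b
      let b1 := |a - b|
      let c1 := PySem.Int.mod (cur + 1) 3
      if a1 = 0 then PySem.Set.ofList [c1]
      else if b1 = 0 then PySem.Set.ofList [PySem.Int.mod (c1 + 1) 3]
      else if a1 > b1 then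
        let a2 := a1 - (PySem.Int.floordiv a1 (b1 * 2)) * (b1 * 2)
        if a2 = 0 then PySem.Set.ofList [c1] else helperLoop fuel a2 b1 c1
      else if b1 > a1 then
        let b2 := b1 - (PySem.Int.floordiv b1 (a1 * 2)) * (a1 * 2)
        if b2 = 0 then PySem.Set.ofList [PySem.Int.mod (c1 + 1) 3]
        else helperLoop fuel a1 b2 c1
      else helperLoop fuel a1 b1 c1

def helper (a : Int) (b : Int) : List Int :=
  if a = 0 ∧ b = 0 then PySem.Set.ofList [0, 1, 2]
  else
    let cur : Int := 0
    let fuel := (a.natAbs + b.natAbs + 1) * (a.natAbs + b.natAbs + 1)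
    if a = 0 then PySem.Set.ofList [cur]
    else if b = 0 then PySem.Set.ofList [PySem.Int.mod (cur + 1) 3]
    else if a > b then
      let a2 := a - (PySem.Int.floordiv a (b * 2)) * (b * 2)
      if a2 = 0 then PySem.Set.ofList [cur] else helperLoop fuel a2 b cur
    else if b > a then
      let b2 := b - (PySem.Int.floordiv b (a * 2)) * (a * 2)
      if b2 = 0 then PySem.Set.ofList [PySem.Int.mod (cur + 1) 3]
      else helperLoop fuel a b2 cur
    else helperLoop fuel a b cur

-- ===== PORT B =====
-- the 'while a % 2 == 0 and b % 2 == 0' loop, fueled; a.natAbs + b.natAbs halvings always suffice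
def stripTwos : Nat → Int → Int → Int × Int
  | 0, a, b => (a, b)
  | fuel + 1, a, b =>
      if PySem.Int.mod a 2 = 0 ∧ PySem.Int.mod b 2 = 0 then
        stripTwos fuel (PySem.Int.floordiv a 2) (PySem.Int.floordiv b 2)
      else (a, b)

def helper_alt (a : Int) (b : Int) : List Int :=
  if a = 0 ∧ b = 0 then PySem.Set.ofList [0, 1, 2]
  else if a = 0 then PySem.Set.ofList [0]
  else if b = 0 then PySem.Set.ofList [1]
  else
    let p := stripTwos (a.natAbs + b.natAbs) a b
    if PySem.Int.mod p.1 2 = 1 then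
      if PySem.Int.mod p.2 2 = 1 then PySem.Set.ofList [2] else PySem.Set.ofList [1]
    else PySem.Set.ofList [0]

-- ===== PRECONDITION & SPEC =====
-- Pre_ excludes negative inputs: A loops forever on most of them, and where it does return
-- the value is an accident of floor division toward minus infinity.
def Pre_helper (a : Int) (b : Int) : Prop := 0 ≤ a ∧ 0 ≤ b
instance (a : Int) (b : Int) : Decidable (Pre_helper a b) := by unfold Pre_helper; infer_instance
def pvWitness_helper : Int × Int := (6, 4)

def Spec_helper (a : Int) (b : Int) (out : List Int) : Prop := out = helper_alt a b
instance (a : Int) (b : Int) (out : List Int) : Decidable (Spec_helper a b out) := by unfold Spec_helper; infer_instance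

-- ===== CLAIM (what is proved, stated in full; the proofs are below) =====
def Claim_equal_helper : Prop := ∀ (a : Int) (b : Int), Dom_helper a b → Pre_helper a b → Spec_helper a b (helper a b)

-- ===== LEMMAS AND PROOFS =====

def vI (a b : Int) : Int :=
  if a % 2 = 1 then (if b % 2 = 1 then 2 else 1)
  else if b % 2 = 1 then 0
  else if h : 0 < a then vI (a / 2) (b / 2)
  else 0
termination_by a.toNat
decreasing_by omega

lemma vI_odd (a b : Int) (h1 : a % 2 = 1) : vI a b = if b % 2 = 1 then 2 else 1 := by
  rw [vI]; simp [h1]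

lemma vI_even_odd (a b : Int) (h1 : ¬ a % 2 = 1) (h2 : b % 2 = 1) : vI a b = 0 := by
  rw [vI]; simp [h1, h2]

lemma vI_rec (a b : Int) (h1 : ¬ a % 2 = 1) (h2 : ¬ b % 2 = 1) (h3 : 0 < a) :
    vI a b = vI (a / 2) (b / 2) := by
  rw [vI]; simp [h1, h2, h3]

lemma vI_range (a b : Int) : vI a b = 0 ∨ vI a b = 1 ∨ vI a b = 2 := by
  fun_induction vI a b <;> simp_all

lemma vI_self (a b : Int) (hab : a = b) (ha : 0 < a) : vI a b = 2 := by
  fun_induction vI a b <;> omega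

lemma vI_dvd_left_aux : ∀ (n : Nat) (a b : Int), a.toNat ≤ n → 0 < a → 0 < b → 2 * b ∣ a →
    vI a b = 0 := by
  intro n
  induction n with
  | zero => intro a b h ha; omega
  | succ n ih =>
      intro a b hn ha hb h
      have h2a : (2 : Int) ∣ a := dvd_trans ⟨b, rfl⟩ h
      have hae : ¬ a % 2 = 1 := by omega
      by_cases hbe : b % 2 = 1
      · exact vI_even_odd a b hae hbe
      · have h2b : (2 : Int) ∣ b := by omega
        rw [vI_rec a b hae hbe ha]
        refine ih (a / 2) (b / 2) (by omega) (by omega) (by omega) ?_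
        rcases h with ⟨k, hk⟩
        refine ⟨k, ?_⟩
        have ha2 : a / 2 = b * k := by
          rw [hk, mul_assoc]; exact Int.mul_ediv_cancel_left _ (by norm_num)
        rw [ha2]
        have hb2 : 2 * (b / 2) = b := by omega
        rw [hb2]

lemma vI_dvd_left (a b : Int) (ha : 0 < a) (hb : 0 < b) (h : 2 * b ∣ a) : vI a b = 0 :=
  vI_dvd_left_aux a.toNat a b le_rfl ha hb h

lemma vI_dvd_right_aux : ∀ (n : Nat) (a b : Int), a.toNat ≤ n → 0 < a → 0 < b → 2 * a ∣ b →
    vI a b = 1 := by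
  intro n
  induction n with
  | zero => intro a b h ha; omega
  | succ n ih =>
      intro a b hn ha hb h
      have h2b : (2 : Int) ∣ b := dvd_trans ⟨a, rfl⟩ h
      have hbe : ¬ b % 2 = 1 := by omega
      by_cases hae : a % 2 = 1
      · rw [vI_odd a b hae]; simp [hbe]
      · have h2a : (2 : Int) ∣ a := by omega
        rw [vI_rec a b hae hbe ha]
        refine ih (a / 2) (b / 2) (by omega) (by omega) (by omega) ?_
        rcases h with ⟨k, hk⟩
        refine ⟨k, ?_⟩
        have hb2 : b / 2 = a * k := by
          rw [hk, mul_assoc]; exact Int.mul_ediv_cancel_left _ (by norm_num)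
        rw [hb2]
        have ha2 : 2 * (a / 2) = a := by omega
        rw [ha2]

lemma vI_dvd_right (a b : Int) (ha : 0 < a) (hb : 0 < b) (h : 2 * a ∣ b) : vI a b = 1 :=
  vI_dvd_right_aux a.toNat a b le_rfl ha hb h

lemma vI_add_aux : ∀ (n : Nat) (a b : Int), a.toNat ≤ n → 0 < a → 0 < b →
    vI (a + 2 * b) b = vI a b := by
  intro n
  induction n with
  | zero => intro a b h ha; omega
  | succ n ih =>
      intro a b hn ha hb
      by_cases hae : a % 2 = 1
      · rw [vI_odd a b hae, vI_odd (a + 2 * b) b (by omega)]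
      · by_cases hbe : b % 2 = 1
        · rw [vI_even_odd a b hae hbe, vI_even_odd (a + 2 * b) b (by omega) hbe]
        · rw [vI_rec a b hae hbe ha, vI_rec (a + 2 * b) b (by omega) hbe (by omega)]
          have h2 : (a + 2 * b) / 2 = a / 2 + 2 * (b / 2) := by omega
          rw [h2]
          exact ih (a / 2) (b / 2) (by omega) (by omega) (by omega)

lemma vI_sub_mul : ∀ (k : Nat) (a b q : Int), q.toNat ≤ k → 0 < b → 0 ≤ q →
    0 < a - 2 * b * q → vI (a - 2 * b * q) b = vI a b := by
  intro k
  induction k with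
  | zero =>
      intro a b q hk hb hq h
      have : q = 0 := by omega
      subst this; simp
  | succ k ih =>
      intro a b q hk hb hq h
      rcases eq_or_lt_of_le hq with hq0 | hq1
      · rw [← hq0]; simp
      · have key : a - 2 * b * q + 2 * b = a - 2 * b * (q - 1) := by ring
        have h1 : vI (a - 2 * b * (q - 1)) b = vI a b := by
          refine ih a b (q - 1) (by omega) hb (by omega) (by nlinarith)
        rw [← h1, ← key, vI_add_aux (a - 2 * b * q).toNat _ _ le_rfl h hb]

lemma vI_swap_aux : ∀ (n : Nat) (a b : Int), a.toNat ≤ n → 0 < a → 0 < b → a ≠ b →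
    vI a b = (vI b |a - b| + 1) % 3 := by
  intro n
  induction n with
  | zero => intro a b h ha; omega
  | succ n ih =>
      intro a b hn ha hb hne
      rcases abs_choice (a - b) with habs | habs
      all_goals
      have habs0 : (0 : Int) ≤ |a - b| := abs_nonneg _
      all_goals
      have hypos : 0 < |a - b| := by omega
      by_cases hae : a % 2 = 1
      · by_cases hbe : b % 2 = 1
        · rw [vI_odd a b hae, vI_odd b _ hbe]
          have : ¬ |a - b| % 2 = 1 := by omega
          simp [hbe, this]
        · rw [vI_odd a b hae, vI_even_odd b _ (by omega) (by omega)]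
          simp [hbe]
      · by_cases hbe : b % 2 = 1
        · rw [vI_even_odd a b hae hbe, vI_odd b _ hbe]
          have : |a - b| % 2 = 1 := by omega
          simp [this]
        · rw [vI_rec a b hae hbe ha, vI_rec b _ hbe (by omega) hb]
          have h2 : |a - b| / 2 = |a / 2 - b / 2| := by
            have h2' : |a / 2 - b / 2| = a / 2 - b / 2 ∨ |a / 2 - b / 2| = -(a / 2 - b / 2) :=
              abs_choice _
            have h2'' : (0 : Int) ≤ |a / 2 - b / 2| := abs_nonneg _
            omega
          rw [h2]
          have hA : a % 2 = 0 := by omega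
          have hB : b % 2 = 0 := by omega
          exact ih (a / 2) (b / 2) (by omega) (by omega) (by omega) (by omega)

lemma vI_swap (a b : Int) (ha : 0 < a) (hb : 0 < b) (hne : a ≠ b) :
    vI a b = (vI b |a - b| + 1) % 3 :=
  vI_swap_aux a.toNat a b le_rfl ha hb hne

def Mm (a b : Int) : Nat :=
  max a.toNat b.toNat * max a.toNat b.toNat + max a.toNat b.toNat +
    (max a.toNat b.toNat - min a.toNat b.toNat)

lemma Mm_lt_of_max_lt (a b a' b' : Int) (h : max a'.toNat b'.toNat < max a.toNat b.toNat) :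
    Mm a' b' < Mm a b := by
  unfold Mm
  have h1 : max a'.toNat b'.toNat - min a'.toNat b'.toNat ≤ max a'.toNat b'.toNat :=
    Nat.sub_le _ _
  nlinarith [h, h1, Nat.zero_le (max a.toNat b.toNat - min a.toNat b.toNat)]

lemma Mm_bound (a b : Int) (A B : Nat) (ha : a.toNat ≤ A) (hb : b.toNat ≤ B) :
    Mm a b < (A + B + 1) * (A + B + 1) := by
  unfold Mm
  have h1 : max a.toNat b.toNat ≤ A + B := by omega
  have h2 : max a.toNat b.toNat - min a.toNat b.toNat ≤ A + B := by omega
  have h3 : max a.toNat b.toNat * max a.toNat b.toNat ≤ (A + B) * (A + B) :=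
    Nat.mul_le_mul h1 h1
  have h4 : (A + B + 1) * (A + B + 1) = (A + B) * (A + B) + (A + B) + (A + B) + 1 := by ring
  omega

lemma Mm_lt_of_eq_max (a b a' b' : Int)
    (h1 : max a'.toNat b'.toNat = max a.toNat b.toNat)
    (h2 : min a.toNat b.toNat < min a'.toNat b'.toNat) : Mm a' b' < Mm a b := by
  unfold Mm
  rw [h1]
  have h3 : min a'.toNat b'.toNat ≤ max a'.toNat b'.toNat := min_le_max
  have h4 : min a.toNat b.toNat ≤ max a.toNat b.toNat := min_le_max
  omega

lemma ofList_singleton (y : Int) : PySem.Set.ofList [y] = [y] := rfl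

lemma vI_add_right_aux : ∀ (n : Nat) (a b : Int), a.toNat ≤ n → 0 < a → 0 < b →
    vI a (b + 2 * a) = vI a b := by
  intro n
  induction n with
  | zero => intro a b h ha; omega
  | succ n ih =>
      intro a b hn ha hb
      by_cases hae : a % 2 = 1
      · rw [vI_odd a _ hae, vI_odd a b hae]
        have : (b + 2 * a) % 2 = b % 2 := by omega
        rw [this]
      · by_cases hbe : b % 2 = 1
        · rw [vI_even_odd a b hae hbe, vI_even_odd a _ hae (by omega)]
        · rw [vI_rec a b hae hbe ha, vI_rec a _ hae (by omega) ha]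
          have h2 : (b + 2 * a) / 2 = b / 2 + 2 * (a / 2) := by omega
          rw [h2]
          exact ih (a / 2) (b / 2) (by omega) (by omega) (by omega)

lemma vI_sub_mul_right : ∀ (k : Nat) (a b q : Int), q.toNat ≤ k → 0 < a → 0 ≤ q →
    0 < b - 2 * a * q → vI a (b - 2 * a * q) = vI a b := by
  intro k
  induction k with
  | zero =>
      intro a b q hk ha hq h
      have : q = 0 := by omega
      subst this; simp
  | succ k ih =>
      intro a b q hk ha hq h
      rcases eq_or_lt_of_le hq with hq0 | hq1
      · rw [← hq0]; simp
      · have key : b - 2 * a * q + 2 * a = b - 2 * a * (q - 1) := by ring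
        have h1 : vI a (b - 2 * a * (q - 1)) = vI a b := by
          refine ih a b (q - 1) (by omega) ha (by omega) (by nlinarith)
        rw [← h1, ← key, vI_add_right_aux a.toNat _ _ le_rfl ha h]

lemma loop_eq : ∀ (fuel : Nat) (a b cur : Int), 0 < a → 0 < b → Mm a b < fuel →
    helperLoop fuel a b cur = [(cur + vI a b) % 3] := by
  intro fuel
  induction fuel with
  | zero => intro a b cur ha hb hf; omega
  | succ fuel ih =>
      intro a b cur ha hb hf
      simp only [helperLoop]
      rw [PySem.Int.mod_eq_emod_of_pos (by norm_num : (0:Int) < 3)]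
      have habs0 : (0 : Int) ≤ |a - b| := abs_nonneg _
      have habs : |a - b| = a - b ∨ |a - b| = -(a - b) := abs_choice (a - b)
      by_cases heq : a = b
      · -- a = b : |a-b| = 0, the b1 = 0 branch returns
        subst heq
        rw [if_neg (by omega), if_pos (by omega),
          PySem.Int.mod_eq_emod_of_pos (by norm_num : (0:Int) < 3),
          ofList_singleton, vI_self a a rfl ha]
        congr 1
        omega
      · -- a ≠ b
        have hb1 : 0 < |a - b| := by omega
        have hswap := vI_swap a b ha hb heq
        have hrange := vI_range b |a - b|
        rw [if_neg (by omega), if_neg (by omega)]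
        by_cases hgt : b > |a - b|
        · rw [if_pos hgt]
          rw [PySem.Int.floordiv_eq_ediv_of_pos (by omega)]
          set q := b / (|a - b| * 2) with hqdef
          have hq0 : 0 ≤ q := Int.ediv_nonneg (by omega) (by omega)
          have hcomm : 2 * |a - b| * q = q * (|a - b| * 2) := by ring
          have hmod : b - q * (|a - b| * 2) = b % (|a - b| * 2) := by
            rw [Int.emod_def]; ring
          have hmlt : b % (|a - b| * 2) < |a - b| * 2 := Int.emod_lt_of_pos _ (by omega)
          have hmge : 0 ≤ b % (|a - b| * 2) := Int.emod_nonneg _ (by omega)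
          have hqnn : 0 ≤ q * (|a - b| * 2) := mul_nonneg hq0 (by omega)
          by_cases hz : b - q * (|a - b| * 2) = 0
          · rw [if_pos hz]
            have hdvd : 2 * |a - b| ∣ b := ⟨q, by omega⟩
            have h0 := vI_dvd_left b _ hb hb1 hdvd
            rw [ofList_singleton]
            congr 1
            omega
          · rw [if_neg hz]
            have hvs : vI (b - 2 * |a - b| * q) |a - b| = vI b |a - b| :=
              vI_sub_mul q.toNat b _ q (by omega) hb1 hq0 (by omega)
            rw [hcomm] at hvs
            have hmeas : Mm (b - q * (|a - b| * 2)) |a - b| < Mm a b := by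
              by_cases hab : b < a
              · apply Mm_lt_of_max_lt
                rcases habs with h | h <;> omega
              · by_cases hq1 : 1 ≤ q
                · have hle : (|a - b| * 2) ≤ q * (|a - b| * 2) :=
                    le_mul_of_one_le_left (by omega) hq1
                  apply Mm_lt_of_max_lt
                  rcases habs with h | h <;> omega
                · have hq0' : q = 0 := by omega
                  have hprod : q * (|a - b| * 2) = 0 := by rw [hq0']; ring
                  have hblt : b < |a - b| * 2 := by
                    by_contra hcon
                    have : 1 ≤ q := (Int.le_ediv_iff_mul_le (by omega)).mpr (by omega)
                    omega
                  apply Mm_lt_of_eq_max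
                  · rcases habs with h | h <;> omega
                  · rcases habs with h | h <;> omega
            rw [ih _ _ _ (by omega) hb1 (by omega), hvs]
            congr 1
            omega
        · rw [if_neg hgt]
          by_cases hlt : |a - b| > b
          · rw [if_pos hlt]
            rw [PySem.Int.floordiv_eq_ediv_of_pos (by omega)]
            set q := |a - b| / (b * 2) with hqdef
            have hq0 : 0 ≤ q := Int.ediv_nonneg (by omega) (by omega)
            have hcomm : 2 * b * q = q * (b * 2) := by ring
            have hmod : |a - b| - q * (b * 2) = |a - b| % (b * 2) := by
              rw [Int.emod_def]; ring
            have hmlt : |a - b| % (b * 2) < b * 2 := Int.emod_lt_of_pos _ (by omega)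
            have hmge : 0 ≤ |a - b| % (b * 2) := Int.emod_nonneg _ (by omega)
            have hqnn : 0 ≤ q * (b * 2) := mul_nonneg hq0 (by omega)
            by_cases hz : |a - b| - q * (b * 2) = 0
            · rw [if_pos hz]
              have hdvd : 2 * b ∣ |a - b| := ⟨q, by omega⟩
              have h1 := vI_dvd_right b _ hb hb1 hdvd
              rw [PySem.Int.mod_eq_emod_of_pos (by norm_num : (0:Int) < 3),
                ofList_singleton]
              congr 1
              omega
            · rw [if_neg hz]
              have hvs : vI b (|a - b| - 2 * b * q) = vI b |a - b| :=
                vI_sub_mul_right q.toNat b _ q (by omega) hb hq0 (by omega)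
              rw [hcomm] at hvs
              have hmeas : Mm b (|a - b| - q * (b * 2)) < Mm a b := by
                apply Mm_lt_of_max_lt
                rcases habs with h | h <;> omega
              rw [ih _ _ _ hb (by omega) (by omega), hvs]
              congr 1
              omega
          · -- b = |a - b|, i.e. a = 2b: plain recursive call
            rw [if_neg hlt]
            have hbb : |a - b| = b := by omega
            have hmeas : Mm b |a - b| < Mm a b := by
              apply Mm_lt_of_max_lt
              rcases habs with h | h <;> omega
            rw [hbb] at hswap
            rw [vI_self b b rfl hb] at hswap
            rw [ih _ _ _ hb hb1 (by omega), hbb, vI_self b b rfl hb]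
            congr 1
            omega

lemma mod_two_eq_emod (x : Int) : PySem.Int.mod x 2 = x % 2 :=
  PySem.Int.mod_eq_emod_of_pos (by norm_num)

lemma floordiv_two_eq_ediv (x : Int) : PySem.Int.floordiv x 2 = x / 2 :=
  PySem.Int.floordiv_eq_ediv_of_pos (by norm_num)

lemma strip_spec : ∀ (f : Nat) (a b : Int), 0 < a → 0 < b → a.natAbs ≤ f →
    0 < (stripTwos f a b).1 ∧ 0 < (stripTwos f a b).2 ∧
    vI (stripTwos f a b).1 (stripTwos f a b).2 = vI a b ∧
    ¬((stripTwos f a b).1 % 2 = 0 ∧ (stripTwos f a b).2 % 2 = 0) := by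
  intro f
  induction f with
  | zero => intro a b ha hb hn; omega
  | succ f ih =>
      intro a b ha hb hn
      simp only [stripTwos, mod_two_eq_emod, floordiv_two_eq_ediv]
      by_cases hc : a % 2 = 0 ∧ b % 2 = 0
      · rw [if_pos hc]
        obtain ⟨p1, p2, p3, p4⟩ := ih (a / 2) (b / 2) (by omega) (by omega) (by omega)
        exact ⟨p1, p2, by rw [p3, ← vI_rec a b (by omega) (by omega) ha], p4⟩
      · rw [if_neg hc]
        exact ⟨ha, hb, rfl, hc⟩

lemma alt_eq (a b : Int) (ha : 0 < a) (hb : 0 < b) : helper_alt a b = [vI a b] := by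
  simp only [helper_alt, mod_two_eq_emod]
  rw [if_neg (by omega), if_neg (by omega), if_neg (by omega)]
  obtain ⟨p1, p2, p3, p4⟩ := strip_spec (a.natAbs + b.natAbs) a b ha hb (by omega)
  set p := stripTwos (a.natAbs + b.natAbs) a b with hp
  by_cases h1 : p.1 % 2 = 1
  · rw [if_pos h1, ← p3, vI_odd p.1 p.2 h1]
    by_cases h2 : p.2 % 2 = 1
    · rw [if_pos h2, if_pos h2, ofList_singleton]
    · rw [if_neg h2, if_neg h2, ofList_singleton]
  · rw [if_neg h1, ← p3, vI_even_odd p.1 p.2 h1 (by omega), ofList_singleton]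

lemma helper_spec_main (a b : Int) (ha : 0 ≤ a) (hb : 0 ≤ b) : helper a b = helper_alt a b := by
  simp only [helper]
  by_cases h00 : a = 0 ∧ b = 0
  · rw [if_pos h00]
    simp only [helper_alt]
    rw [if_pos h00]
  · rw [if_neg h00]
    by_cases ha0 : a = 0
    · rw [if_pos ha0]
      simp only [helper_alt]
      rw [if_neg h00, if_pos ha0]
    · rw [if_neg ha0]
      by_cases hb0 : b = 0
      · rw [if_pos hb0]
        simp only [helper_alt]
        rw [if_neg h00, if_neg ha0, if_pos hb0]
        rfl
      · rw [if_neg hb0]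
        have hap : 0 < a := by omega
        have hbp : 0 < b := by omega
        rw [alt_eq a b hap hbp]
        have hrange := vI_range a b
        by_cases hgt : a > b
        · rw [if_pos hgt]
          rw [PySem.Int.floordiv_eq_ediv_of_pos (by omega)]
          set q := a / (b * 2) with hqdef
          have hq0 : 0 ≤ q := Int.ediv_nonneg (by omega) (by omega)
          have hcomm : 2 * b * q = q * (b * 2) := by ring
          have hmod : a - q * (b * 2) = a % (b * 2) := by rw [Int.emod_def]; ring
          have hmlt : a % (b * 2) < b * 2 := Int.emod_lt_of_pos _ (by omega)
          have hmge : 0 ≤ a % (b * 2) := Int.emod_nonneg _ (by omega)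
          have hqnn : 0 ≤ q * (b * 2) := mul_nonneg hq0 (by omega)
          by_cases hz : a - q * (b * 2) = 0
          · rw [if_pos hz, vI_dvd_left a b hap hbp ⟨q, by omega⟩, ofList_singleton]
          · rw [if_neg hz]
            have hvs : vI (a - 2 * b * q) b = vI a b :=
              vI_sub_mul q.toNat a b q (by omega) hbp hq0 (by omega)
            rw [hcomm] at hvs
            have hmeas : Mm (a - q * (b * 2)) b <
                (a.natAbs + b.natAbs + 1) * (a.natAbs + b.natAbs + 1) :=
              Mm_bound _ _ _ _ (by omega) (by omega)
            rw [loop_eq _ _ _ _ (by omega) hbp hmeas, hvs]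
            have hrange2 := vI_range a b
            congr 1
            omega
        · rw [if_neg hgt]
          by_cases hlt : b > a
          · rw [if_pos hlt]
            rw [PySem.Int.floordiv_eq_ediv_of_pos (by omega)]
            set q := b / (a * 2) with hqdef
            have hq0 : 0 ≤ q := Int.ediv_nonneg (by omega) (by omega)
            have hcomm : 2 * a * q = q * (a * 2) := by ring
            have hmod : b - q * (a * 2) = b % (a * 2) := by rw [Int.emod_def]; ring
            have hmlt : b % (a * 2) < a * 2 := Int.emod_lt_of_pos _ (by omega)
            have hmge : 0 ≤ b % (a * 2) := Int.emod_nonneg _ (by omega)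
            have hqnn : 0 ≤ q * (a * 2) := mul_nonneg hq0 (by omega)
            by_cases hz : b - q * (a * 2) = 0
            · rw [if_pos hz, vI_dvd_right a b hap hbp ⟨q, by omega⟩, ofList_singleton]
              congr 1
            · rw [if_neg hz]
              have hvs : vI a (b - 2 * a * q) = vI a b :=
                vI_sub_mul_right q.toNat a b q (by omega) hap hq0 (by omega)
              rw [hcomm] at hvs
              have hmeas : Mm a (b - q * (a * 2)) <
                  (a.natAbs + b.natAbs + 1) * (a.natAbs + b.natAbs + 1) :=
                Mm_bound _ _ _ _ (by omega) (by omega)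
              rw [loop_eq _ _ _ _ hap (by omega) hmeas, hvs]
              congr 1
              omega
          · rw [if_neg hlt]
            have heq : a = b := by omega
            have hmeas : Mm a b <
                (a.natAbs + b.natAbs + 1) * (a.natAbs + b.natAbs + 1) :=
              Mm_bound _ _ _ _ (by omega) (by omega)
            rw [loop_eq _ _ _ _ hap hbp hmeas, vI_self a b heq hap]
            congr 1

-- ===== VERDICT (by name: the statement is the Claim_ definition above) =====
theorem helper_spec : Claim_equal_helper := by
  intro a b _ hpre
  unfold Spec_helper
  exact helper_spec_main a b hpre.1 hpre.2
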